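-- pv_equiv track=rewrite | github.com/Amirutha/tranX | datasets/libro/example_processor.py | q_process
-- ===== SOURCE A (Python) =====
-- def q_process(_q):
--   m2e_dict = {}
--   e2type_dict = {}
--   is_successful = True
--   q = _q
--   # tokenize q
--   q = ' '.join(q.split(' '))
--   # find entities in q, and replace them with type_id
--   const_index_dict = {}
--   type_index_dict = {}
--   while True:
--     q_list = list(filter(lambda x: len(x) > 0, ' '.join(map(lambda x: x, q.split(' '))).split(' ')))
--     found_flag=False
--     for n in range(5, 0, -1):
--       if len(q_list) >= n:
--         for i in range(0, len(q_list)-n+1):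
--           m = ' '.join(q_list[i:i+n])
--           if m in m2e_dict:
--             e = m2e_dict[m]
--             t = e2type_dict[e]
--             if e not in const_index_dict:
--               type_index_dict[t] = type_index_dict.get(t, -1) + 1
--               const_index_dict[e] = type_index_dict[t]
--             q = q.replace(' %s ' % (m,), ' %s%d ' % (t, const_index_dict[e]))
--             found_flag=True
--             break
--         if found_flag:
--           break
--     if not found_flag:
--       break
--
--   q_list = list(filter(lambda x: len(x) > 0, ' '.join(map(lambda x: x, q.split(' '))).split(' ')))
--
--   return q_list, const_index_dict, type_index_dict
-- ===== SOURCE B (Python) =====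
-- def q_process(_q):
--     # The entity dictionaries in the original are always empty, so the replacement
--     # loop can never fire: tokenization on ' ' (dropping empty pieces) is the result.
--     return [x for x in _q.split(' ') if len(x) > 0], {}, {}
-- ===== Notes on version B (the rewrite author's own statement) =====
-- stated objective: simpler
-- what changed: B drops the entire while/for entity-replacement machinery (dead code: the lookup dicts are always empty, so no match can ever fire) and computes the token list directly as a single split-on-space filter, returning fresh empty dicts.
import Mathlib
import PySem

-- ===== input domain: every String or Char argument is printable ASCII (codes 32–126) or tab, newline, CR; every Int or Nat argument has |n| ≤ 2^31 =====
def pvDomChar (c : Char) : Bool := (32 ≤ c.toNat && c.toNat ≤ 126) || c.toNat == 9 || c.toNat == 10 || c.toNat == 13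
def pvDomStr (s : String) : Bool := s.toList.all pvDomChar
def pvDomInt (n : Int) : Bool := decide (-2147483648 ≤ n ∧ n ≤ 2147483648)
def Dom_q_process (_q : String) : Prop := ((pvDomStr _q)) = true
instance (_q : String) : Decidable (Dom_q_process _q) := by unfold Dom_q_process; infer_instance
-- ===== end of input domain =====

-- B replaces A's dead entity-replacement while/for machinery (its lookup dicts are always
-- empty, so no match can ever fire) by a single split-on-space filter; objective: simpler.

-- ===== PORT A =====

-- one iteration of A's `while True:` body: returns (q, found_flag, const_index_dict, type_index_dict)
def pvIterA (q : List Char)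
    (m2e e2type : PySem.Dict (List Char) (List Char))
    (cid tid : PySem.Dict (List Char) Int) :
    List Char × Bool × PySem.Dict (List Char) Int × PySem.Dict (List Char) Int :=
  let q_list := (PySem.Chars.splitOn
      (PySem.Chars.join [' '] ((PySem.Chars.splitOn q [' ']).map (fun x => x))) [' ']).filter
      (fun x => x.length > 0)
  (PySem.List.pyRange 5 0 (-1)).foldl (fun st n =>
    if st.2.1 then st            -- `break` out of the outer for once found_flag is set
    else if (q_list.length : Int) ≥ n then
      (PySem.List.pyRange 0 ((q_list.length : Int) - n + 1) 1).foldl (fun st i =>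
        if st.2.1 then st        -- inner `break`
        else
          let m := PySem.Chars.join [' '] (PySem.List.slice q_list (some i) (some (i + n)))
          match m2e.get? m with
          | none => st
          | some e =>            -- unreachable when m2e is empty; e2type[e] guarded with getD
            let t := (e2type.get? e).getD []
            let (cid', tid') :=
              if (st.2.2.1.get? e).isNone then
                let tid' := st.2.2.2.insert t ((st.2.2.2.getD t (-1)) + 1)
                (st.2.2.1.insert e ((tid'.get? t).getD 0), tid')
              else (st.2.2.1, st.2.2.2)
            let q' := PySem.Chars.replace st.1 ([' '] ++ m ++ [' '])
                ([' '] ++ t ++ PySem.Int.toChars ((cid'.get? e).getD 0) ++ [' '])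
            (q', true, cid', tid')) st
    else st) (q, false, cid, tid)

-- A's `while True:` loop; the fuel is a totality guard only (the loop exits whenever
-- found_flag is false, which pvIterA_empty below shows is the case on the first pass)
def pvWhileA (fuel : Nat) (q : List Char)
    (m2e e2type : PySem.Dict (List Char) (List Char))
    (cid tid : PySem.Dict (List Char) Int) :
    List Char × PySem.Dict (List Char) Int × PySem.Dict (List Char) Int :=
  match fuel with
  | 0 => (q, cid, tid)
  | fuel + 1 =>
    let r := pvIterA q m2e e2type cid tid
    if r.2.1 then pvWhileA fuel r.1 m2e e2type r.2.2.1 r.2.2.2 else (r.1, r.2.2.1, r.2.2.2)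

def q_process (_q : String) : List String × (List (String × Int)) × (List (String × Int)) :=
  let m2e : PySem.Dict (List Char) (List Char) := PySem.Dict.empty
  let e2type : PySem.Dict (List Char) (List Char) := PySem.Dict.empty
  let q := _q.toList
  let q := PySem.Chars.join [' '] (PySem.Chars.splitOn q [' '])
  let cid : PySem.Dict (List Char) Int := PySem.Dict.empty
  let tid : PySem.Dict (List Char) Int := PySem.Dict.empty
  let r := pvWhileA (q.length + 1) q m2e e2type cid tid
  let q_list := (PySem.Chars.splitOn
      (PySem.Chars.join [' '] ((PySem.Chars.splitOn r.1 [' ']).map (fun x => x))) [' ']).filter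
      (fun x => x.length > 0)
  (q_list.map (fun cs => String.ofList cs),
   r.2.1.items.map (fun kv => (String.ofList kv.1, kv.2)),
   r.2.2.items.map (fun kv => (String.ofList kv.1, kv.2)))

-- ===== PORT B =====
def q_process_alt (_q : String) : List String × (List (String × Int)) × (List (String × Int)) :=
  (((PySem.Chars.splitOn _q.toList [' ']).filter (fun x => x.length > 0)).map
      (fun cs => String.ofList cs), [], [])

-- ===== PRECONDITION & SPEC =====
def Spec_q_process (_q : String) (out : List String × (List (String × Int)) × (List (String × Int))) : Prop := out = q_process_alt _q
instance (_q : String) (out : List String × (List (String × Int)) × (List (String × Int))) : Decidable (Spec_q_process _q out) := by unfold Spec_q_process; infer_instance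

-- ===== CLAIM (what is proved, stated in full; the proofs are below) =====
def Claim_equal_q_process : Prop := ∀ (_q : String), Dom_q_process _q → Spec_q_process _q (q_process _q)

-- ===== LEMMAS AND PROOFS =====

-- simple structural model of s.split(' ') (single-char separator)
def pvSplitAux (c : Char) : List Char → List Char → List (List Char)
  | [], cur => [cur.reverse]
  | a :: rest, cur =>
    if a = c then cur.reverse :: pvSplitAux c rest [] else pvSplitAux c rest (a :: cur)

lemma pvSplitAux_ne_nil (c : Char) (l cur : List Char) : pvSplitAux c l cur ≠ [] := by
  induction l generalizing cur with
  | nil => simp [pvSplitAux]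
  | cons a rest ih => simp only [pvSplitAux]; split_ifs <;> simp [ih]

lemma pvSplitAux_no_sep (c : Char) (l cur : List Char) (hcur : c ∉ cur) :
    ∀ p ∈ pvSplitAux c l cur, c ∉ p := by
  induction l generalizing cur with
  | nil =>
    intro p hp; simp [pvSplitAux] at hp; subst hp; simpa using hcur
  | cons a rest ih =>
    intro p hp
    simp only [pvSplitAux] at hp
    split_ifs at hp with h
    · rcases List.mem_cons.mp hp with rfl | hp
      · simpa using hcur
      · exact ih [] (by simp) p hp
    · exact ih (a :: cur) (by simp [hcur, Ne.symm h]) p hp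

lemma pvSplitAux_append (c : Char) (p : List Char) (hp : c ∉ p) :
    ∀ (l cur : List Char), pvSplitAux c (p ++ l) cur = pvSplitAux c l (p.reverse ++ cur) := by
  induction p with
  | nil => intro l cur; simp
  | cons a rest ih =>
    intro l cur
    have ha : a ≠ c := by rintro rfl; exact hp (by simp)
    have hrest : c ∉ rest := fun h => hp (by simp [h])
    simp only [List.cons_append, pvSplitAux, if_neg ha]
    rw [ih hrest l (a :: cur)]
    simp

lemma pv_roundtrip (c : Char) : ∀ (parts : List (List Char)), parts ≠ [] →
    (∀ p ∈ parts, c ∉ p) →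
    pvSplitAux c (PySem.Chars.join [c] parts) [] = parts := by
  intro parts
  induction parts with
  | nil => intro h; exact absurd rfl h
  | cons p rest ih =>
    intro _ hno
    have hp : c ∉ p := hno p (by simp)
    cases rest with
    | nil =>
      rw [PySem.Chars.join_singleton]
      have := pvSplitAux_append c p hp [] []
      simpa [pvSplitAux] using this
    | cons q t =>
      rw [PySem.Chars.join_cons_cons]
      rw [show p ++ [c] ++ PySem.Chars.join [c] (q :: t)
            = p ++ ([c] ++ PySem.Chars.join [c] (q :: t)) by simp]
      rw [pvSplitAux_append c p hp]
      simp only [List.append_nil, List.singleton_append, pvSplitAux]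
      rw [ih (by simp) (fun x hx => hno x (by simp [hx]))]
      simp

lemma pv_go_eq (c : Char) : ∀ (fuel : Nat) (l cur : List Char) (acc : List (List Char)),
    l.length < fuel →
    PySem.Chars.splitOn.go [c] fuel l cur acc = acc.reverse ++ pvSplitAux c l cur := by
  intro fuel
  induction fuel with
  | zero => intro l cur acc h; omega
  | succ fuel ih =>
    intro l cur acc h
    cases l with
    | nil => simp [PySem.Chars.splitOn.go, pvSplitAux]
    | cons a rest =>
      by_cases hac : a = c
      · subst hac
        have : PySem.Chars.splitOn.go [a] (fuel + 1) (a :: rest) cur acc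
            = PySem.Chars.splitOn.go [a] fuel rest [] (cur.reverse :: acc) := by
          simp [PySem.Chars.splitOn.go, List.isPrefixOf]
        rw [this, ih rest [] (cur.reverse :: acc) (by simp at h ⊢; omega)]
        simp [pvSplitAux]
      · have : PySem.Chars.splitOn.go [c] (fuel + 1) (a :: rest) cur acc
            = PySem.Chars.splitOn.go [c] fuel rest (a :: cur) acc := by
          simp [PySem.Chars.splitOn.go, List.isPrefixOf, Ne.symm hac]
        rw [this, ih rest (a :: cur) acc (by simp at h ⊢; omega)]
        simp [pvSplitAux, hac]

-- PySem's splitOn with a one-char separator is pvSplitAux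
lemma pv_splitOn_eq (c : Char) (l : List Char) :
    PySem.Chars.splitOn l [c] = pvSplitAux c l [] := by
  have : PySem.Chars.splitOn l [c] = PySem.Chars.splitOn.go [c] (l.length + 1) l [] [] := rfl
  rw [this, pv_go_eq c (l.length + 1) l [] [] (by omega)]
  simp

-- one iteration of A's loop over the always-empty entity dict does nothing
lemma pvIterA_empty (q : List Char) (e2type : PySem.Dict (List Char) (List Char))
    (cid tid : PySem.Dict (List Char) Int) :
    pvIterA q PySem.Dict.empty e2type cid tid = (q, false, cid, tid) := by
  unfold pvIterA
  refine List.foldl_fixed' (fun n => ?_) _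
  dsimp only
  split_ifs
  all_goals try rfl
  all_goals exact List.foldl_fixed' (fun i => by simp [PySem.Dict.get?_empty]) _

theorem q_process_spec : Claim_equal_q_process := by
  intro _q _
  unfold Spec_q_process q_process q_process_alt
  simp only [pvWhileA, pvIterA_empty]
  have hS0 : PySem.Chars.splitOn _q.toList [' '] = pvSplitAux ' ' _q.toList [] :=
    pv_splitOn_eq ' ' _q.toList
  have hne : pvSplitAux ' ' _q.toList [] ≠ [] := pvSplitAux_ne_nil ' ' _q.toList []
  have hno : ∀ p ∈ pvSplitAux ' ' _q.toList [], ' ' ∉ p :=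
    pvSplitAux_no_sep ' ' _q.toList [] (by simp)
  have hrt : PySem.Chars.splitOn
      (PySem.Chars.join [' '] (pvSplitAux ' ' _q.toList [])) [' ']
      = pvSplitAux ' ' _q.toList [] := by
    rw [pv_splitOn_eq]
    exact pv_roundtrip ' ' _ hne hno
  simp [hS0, hrt, List.map_id', PySem.Dict.empty]
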